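-- pv_equiv track=rewrite | github.com/YijingLin123/ACon2 | python/AgentSemantic/step2_summarize_news.py | combine_fields
-- ===== SOURCE A (Python) =====
-- from typing import Iterable, List, Sequence, Set
--
-- def combine_fields(parts: Sequence[str]) -> str:
--     cleaned: List[str] = []
--     for part in parts:
--         if not part:
--             continue
--         fragments = [frag.strip() for frag in part.split("||")]
--         cleaned.extend(fragment for fragment in fragments if fragment)
--     return " ".join(cleaned)
-- ===== SOURCE B (Python) =====
-- def combine_fields(parts):
--     cleaned = []
--     for part in parts:
--         buf = []   # current fragment, leading/trailing whitespace excluded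
--         pend = []  # run of whitespace seen since last non-space char of buf
--         i = 0
--         n = len(part)
--         while i < n:
--             c = part[i]
--             if c == "|" and i + 1 < n and part[i + 1] == "|":
--                 if buf:
--                     cleaned.append("".join(buf))
--                 buf = []
--                 pend = []
--                 i += 2
--             elif c.isspace():
--                 if buf:
--                     pend.append(c)
--                 i += 1
--             else:
--                 buf.extend(pend)
--                 pend = []
--                 buf.append(c)
--                 i += 1
--         if buf:
--             cleaned.append("".join(buf))
--     return " ".join(cleaned)
-- ===== Notes on version B (the rewrite author's own statement) =====
-- stated objective: alternative
-- what changed: B replaces A's library-based pipeline (split('||') per part, strip each fragment, filter, extend a list) with a single character-level scan: an explicit state machine over each part's characters that detects the '||' delimiter by lookahead and trims whitespace via a committed-buffer/pending-whitespace pair, emitting fragments directly.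
import Mathlib
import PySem

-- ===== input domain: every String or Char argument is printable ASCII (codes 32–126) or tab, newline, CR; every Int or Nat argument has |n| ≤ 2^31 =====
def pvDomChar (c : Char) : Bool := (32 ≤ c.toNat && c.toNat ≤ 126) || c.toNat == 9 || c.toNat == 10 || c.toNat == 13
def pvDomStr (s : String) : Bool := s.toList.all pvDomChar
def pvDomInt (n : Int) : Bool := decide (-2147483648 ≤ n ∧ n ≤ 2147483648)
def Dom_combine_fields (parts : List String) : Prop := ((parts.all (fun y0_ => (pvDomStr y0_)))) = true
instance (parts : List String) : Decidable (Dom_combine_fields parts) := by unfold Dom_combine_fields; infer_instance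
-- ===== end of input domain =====

-- B replaces A's split/strip/filter pipeline by an explicit character-level state machine
-- (delimiter lookahead + committed-buffer/pending-whitespace trimming): a different algorithm of the same cost.


-- ===== PORT A =====
def combine_fields (parts : List String) : String :=
  String.ofList (PySem.Chars.join [' ']
    (parts.foldl (fun cleaned part =>
      if part.toList == [] then cleaned
      else
        cleaned ++ (((PySem.Chars.splitOn part.toList ['|', '|']).map
          PySem.Chars.strip).filter (fun f => !(f == [])))) []))

-- ===== PORT B =====
-- B's inner while-loop over one part's characters: buf = committed fragment chars
-- (no leading/trailing whitespace), pend = pending whitespace run, cleaned = emitted fragments.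
def pvScan : List Char → List Char → List Char → List (List Char) → List (List Char)
  | [], buf, _pend, cleaned => if buf == [] then cleaned else cleaned ++ [buf]
  | c :: rest, buf, pend, cleaned =>
    if c == '|' && rest.head? == some '|' then
      pvScan rest.tail [] [] (if buf == [] then cleaned else cleaned ++ [buf])
    else if PySem.Chars.isspace c then
      pvScan rest buf (if buf == [] then [] else pend ++ [c]) cleaned
    else
      pvScan rest (buf ++ pend ++ [c]) [] cleaned
termination_by cs _ _ _ => cs.length
decreasing_by
  · simpa using Nat.lt_succ_of_le (Nat.sub_le _ _)
  · exact Nat.lt_succ_self _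
  · exact Nat.lt_succ_self _

def combine_fields_alt (parts : List String) : String :=
  String.ofList (PySem.Chars.join [' ']
    (parts.foldl (fun cleaned part => pvScan part.toList [] [] cleaned) []))

-- ===== PRECONDITION & SPEC =====
def Spec_combine_fields (parts : List String) (out : String) : Prop := out = combine_fields_alt parts
instance (parts : List String) (out : String) : Decidable (Spec_combine_fields parts out) := by unfold Spec_combine_fields; infer_instance

-- ===== CLAIM (what is proved, stated in full; the proofs are below) =====
def Claim_equal_combine_fields : Prop := ∀ (parts : List String), Dom_combine_fields parts → Spec_combine_fields parts (combine_fields parts)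

-- ===== LEMMAS AND PROOFS =====

-- recursive characterisation of Python's split on "||" (proof helper; neither port uses it)
def pvBSplit : List Char → List (List Char)
  | [] => [[]]
  | c :: rest =>
    if c == '|' && rest.head? == some '|' then [] :: pvBSplit rest.tail
    else (pvBSplit rest).modifyHead (c :: ·)
termination_by cs => cs.length
decreasing_by
  · simpa using Nat.lt_succ_of_le (Nat.sub_le _ _)
  · exact Nat.lt_succ_self _

lemma pvBSplit_ne_nil (cs : List Char) : pvBSplit cs ≠ [] := by
  induction cs using pvBSplit.induct with
  | case1 => simp [pvBSplit]
  | case2 c rest h ih => simp [pvBSplit, h]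
  | case3 c rest h ih =>
    simp only [pvBSplit, if_neg h]
    cases hb : pvBSplit rest with
    | nil => exact absurd hb ih
    | cons f fs => simp

lemma pvDelim_iff (c : Char) (rest : List Char) :
    (c == '|' && rest.head? == some '|') = true ↔ ['|','|'].isPrefixOf (c :: rest) = true := by
  cases rest with
  | nil => simp [List.isPrefixOf]
  | cons r rs =>
    simp [List.isPrefixOf]
    exact ⟨fun ⟨a, b⟩ => ⟨a.symm, b.symm⟩, fun ⟨a, b⟩ => ⟨a.symm, b.symm⟩⟩

lemma splitOn_go_spec (fuel : ℕ) :
    ∀ (l cur : List Char) (accl : List (List Char)), l.length < fuel →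
      PySem.Chars.splitOn.go ['|','|'] fuel l cur accl
        = accl.reverse ++ (pvBSplit l).modifyHead (cur.reverse ++ ·) := by
  induction fuel with
  | zero => intro l cur accl h; omega
  | succ fuel ih =>
    intro l cur accl h
    cases l with
    | nil => simp [PySem.Chars.splitOn.go, pvBSplit]
    | cons c rest =>
      by_cases hpre : ['|','|'].isPrefixOf (c :: rest) = true
      · obtain ⟨hc, rs, hrest⟩ : c = '|' ∧ ∃ rs, rest = '|' :: rs := by
          cases rest with
          | nil => simp [List.isPrefixOf] at hpre
          | cons r rs' =>
            simp [List.isPrefixOf] at hpre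
            exact ⟨hpre.1.symm, rs', by rw [← hpre.2]⟩
        subst hc; subst hrest
        rw [PySem.Chars.splitOn.go]
        rw [if_pos (show (['|','|'] : List Char).isPrefixOf ('|' :: '|' :: rs) = true by
          simp [List.isPrefixOf])]
        have hlen : rs.length < fuel := by simp at h; omega
        rw [show List.drop (['|','|'] : List Char).length ('|' :: '|' :: rs) = rs by simp,
          ih rs [] _ hlen]
        rw [show pvBSplit ('|' :: '|' :: rs) = [] :: pvBSplit rs by
          rw [pvBSplit]; rw [if_pos (by simp)]; rfl]
        obtain ⟨f, fs, hb⟩ := List.exists_cons_of_ne_nil (pvBSplit_ne_nil rs)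
        rw [hb]; simp
      · rw [PySem.Chars.splitOn.go]
        rw [if_neg hpre]
        have hlen : rest.length < fuel := by simp at h; omega
        rw [ih rest (c :: cur) accl hlen]
        rw [show pvBSplit (c :: rest) = (pvBSplit rest).modifyHead (c :: ·) by
          rw [pvBSplit]; rw [if_neg (by rw [pvDelim_iff]; exact hpre)]]
        obtain ⟨f, fs, hb⟩ := List.exists_cons_of_ne_nil (pvBSplit_ne_nil rest)
        rw [hb]; simp

lemma pvBSplit_eq_splitOn (cs : List Char) :
    pvBSplit cs = PySem.Chars.splitOn cs ['|','|'] := by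
  have h := splitOn_go_spec (cs.length + 1) cs [] [] (Nat.lt_succ_self _)
  rw [PySem.Chars.splitOn, h]
  obtain ⟨f, fs, hb⟩ := List.exists_cons_of_ne_nil (pvBSplit_ne_nil cs)
  rw [hb]; simp

-- invariant on the scanner state
def pvInv (buf pend : List Char) : Prop :=
  (buf = [] → pend = []) ∧ (∀ c ∈ pend, PySem.Chars.isspace c = true) ∧
  (∀ x, buf.head? = some x → PySem.Chars.isspace x = false) ∧
  (∀ x, buf.getLast? = some x → PySem.Chars.isspace x = false)

lemma strip_cons_ws (c : Char) (xs : List Char) (h : PySem.Chars.isspace c = true) :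
    PySem.Chars.strip (c :: xs) = PySem.Chars.strip xs := by
  simp [PySem.Chars.strip, PySem.Chars.lstrip, h]

lemma strip_sandwich (buf pend : List Char) (h : pvInv buf pend) :
    PySem.Chars.strip (buf ++ pend) = buf := by
  obtain ⟨h1, h2, h3, h4⟩ := h
  cases buf with
  | nil =>
    rw [h1 rfl]
    simp [PySem.Chars.strip, PySem.Chars.lstrip, PySem.Chars.rstrip]
  | cons bh bt =>
    have hbh : PySem.Chars.isspace bh = false := h3 bh rfl
    obtain ⟨z, zs, hz⟩ := List.exists_cons_of_ne_nil
      (show (bh :: bt).reverse ≠ [] by simp)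
    have hzl : PySem.Chars.isspace z = false := by
      apply h4
      rw [← List.head?_reverse, hz]; rfl
    rw [PySem.Chars.strip]
    rw [show PySem.Chars.lstrip (bh :: bt ++ pend) = bh :: bt ++ pend by
      simp [PySem.Chars.lstrip, List.dropWhile_cons, hbh]]
    rw [PySem.Chars.rstrip, List.reverse_append, hz, List.dropWhile_append]
    rw [show List.dropWhile PySem.Chars.isspace pend.reverse = [] by
      rw [List.dropWhile_eq_nil_iff]
      intro x hx; exact h2 x (by simpa using hx)]
    rw [show List.dropWhile PySem.Chars.isspace (z :: zs) = z :: zs by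
      simp [List.dropWhile_cons, hzl]]
    simp only [List.isEmpty_nil, if_true]
    rw [← hz, List.reverse_reverse]

lemma pvScan_nil (buf pend : List Char) (cleaned : List (List Char)) (hinv : pvInv buf pend) :
    pvScan [] buf pend cleaned
      = cleaned ++ (((pvBSplit []).modifyHead ((buf ++ pend) ++ ·)).map
          PySem.Chars.strip).filter (fun f => !(f == [])) := by
  rw [pvScan]
  rw [show pvBSplit [] = [[]] by rw [pvBSplit]]
  simp only [List.modifyHead, List.append_nil, List.map_cons, List.map_nil,
    List.filter_cons, List.filter_nil]
  rw [strip_sandwich buf pend hinv]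
  by_cases hbuf : buf = []
  · subst hbuf; simp
  · simp [hbuf]

lemma pvScan_go (n : ℕ) : ∀ (cs : List Char), cs.length ≤ n →
    ∀ (buf pend : List Char) (cleaned : List (List Char)), pvInv buf pend →
    pvScan cs buf pend cleaned
      = cleaned ++ (((pvBSplit cs).modifyHead ((buf ++ pend) ++ ·)).map
          PySem.Chars.strip).filter (fun f => !(f == [])) := by
  induction n with
  | zero =>
    intro cs hcs buf pend cleaned hinv
    cases cs with
    | nil => exact pvScan_nil buf pend cleaned hinv
    | cons c rest => simp at hcs
  | succ n ih =>
    intro cs hcs buf pend cleaned hinv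
    cases cs with
    | nil => exact pvScan_nil buf pend cleaned hinv
    | cons c rest =>
      have hrestlen : rest.length ≤ n := by simp at hcs; omega
      by_cases hdelim : (c == '|' && rest.head? == some '|') = true
      · -- delimiter: flush and restart with empty state
        rw [pvScan, if_pos hdelim]
        rw [ih _ (by rw [List.length_tail]; omega) _ _ _
          ⟨fun _ => rfl, by simp, by simp, by simp⟩]
        rw [show pvBSplit (c :: rest) = [] :: pvBSplit rest.tail by
          rw [pvBSplit]; rw [if_pos hdelim]]
        obtain ⟨f, fs, hb⟩ := List.exists_cons_of_ne_nil (pvBSplit_ne_nil rest.tail)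
        rw [hb]
        simp only [List.modifyHead, List.append_nil, List.nil_append, List.map_cons,
          List.filter_cons]
        rw [strip_sandwich buf pend hinv]
        by_cases hbuf : buf = []
        · subst hbuf; simp
        · simp [hbuf]
      · rw [show pvBSplit (c :: rest) = (pvBSplit rest).modifyHead (c :: ·) by
          rw [pvBSplit]; rw [if_neg hdelim]]
        obtain ⟨f, fs, hb⟩ := List.exists_cons_of_ne_nil (pvBSplit_ne_nil rest)
        obtain ⟨h1, h2, h3, h4⟩ := hinv
        by_cases hws : PySem.Chars.isspace c = true
        · -- whitespace: extend the pending run (or skip it before the fragment starts)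
          rw [pvScan, if_neg hdelim, if_pos hws]
          by_cases hbuf : buf = []
          · subst hbuf
            have hpend : pend = [] := h1 rfl
            subst hpend
            split_ifs with hcond
            · rw [ih _ hrestlen _ _ _ ⟨fun _ => rfl, by simp, h3, h4⟩, hb]
              simp [List.modifyHead, strip_cons_ws c f hws]
            · simp at hcond
          · split_ifs with hcond
            · exact absurd (by simpa using hcond) hbuf
            · have hinv' : pvInv buf (pend ++ [c]) := by
                refine ⟨fun h => absurd h hbuf, ?_, h3, h4⟩
                intro x hx
                rcases List.mem_append.mp hx with hmem | hmem
                · exact h2 x hmem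
                · simp at hmem; rw [hmem]; exact hws
              rw [ih _ hrestlen _ _ _ hinv', hb]
              have hlists : (buf ++ (pend ++ [c])) ++ f = (buf ++ pend) ++ (c :: f) := by
                simp
              simp only [List.modifyHead]
              rw [hlists]
        · -- ordinary character: commit pending whitespace and the character
          have hwsc : PySem.Chars.isspace c = false := by
            rw [Bool.not_eq_true] at hws; exact hws
          rw [pvScan, if_neg hdelim, if_neg hws]
          have hinv' : pvInv (buf ++ pend ++ [c]) [] := by
            refine ⟨by simp, by simp, ?_, ?_⟩
            · intro x hx
              cases hbuf : buf with
              | nil =>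
                rw [hbuf] at hx; rw [h1 hbuf] at hx
                simp at hx; rw [← hx]; exact hwsc
              | cons bh bt =>
                rw [hbuf] at hx; simp at hx
                exact h3 x (by rw [hbuf, hx]; rfl)
            · intro x hx
              rw [List.getLast?_concat] at hx
              simp at hx; rw [← hx]; exact hwsc
          rw [ih _ hrestlen _ _ _ hinv', hb]
          have hlists : ((buf ++ pend ++ [c]) ++ []) ++ f = (buf ++ pend) ++ (c :: f) := by
            simp
          simp only [List.modifyHead]
          rw [hlists]

lemma pvScan_part (cs : List Char) (cleaned : List (List Char)) :
    pvScan cs [] [] cleaned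
      = cleaned ++ (((PySem.Chars.splitOn cs ['|','|']).map
          PySem.Chars.strip).filter (fun f => !(f == []))) := by
  have h := pvScan_go cs.length cs le_rfl [] [] cleaned
    ⟨fun _ => rfl, by simp, by simp, by simp⟩
  rw [h, pvBSplit_eq_splitOn]
  obtain ⟨f, fs, hb⟩ := List.exists_cons_of_ne_nil
    (pvBSplit_eq_splitOn cs ▸ pvBSplit_ne_nil cs)
  rw [hb]; simp

lemma fold_eq : ∀ (parts : List String) (cleaned : List (List Char)),
    parts.foldl (fun cleaned part => pvScan part.toList [] [] cleaned) cleaned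
      = parts.foldl (fun cleaned part =>
          if part.toList == [] then cleaned
          else
            cleaned ++ (((PySem.Chars.splitOn part.toList ['|', '|']).map
              PySem.Chars.strip).filter (fun f => !(f == [])))) cleaned := by
  intro parts
  induction parts with
  | nil => intro cleaned; rfl
  | cons part rest ih =>
    intro cleaned
    rw [List.foldl_cons, List.foldl_cons, pvScan_part, ih]
    congr 1
    by_cases hp : part.toList = []
    · rw [if_pos (by simpa using hp), hp]
      rw [show PySem.Chars.splitOn ([] : List Char) ['|','|'] = [[]] from rfl]
      simp [PySem.Chars.strip, PySem.Chars.lstrip, PySem.Chars.rstrip]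
    · rw [if_neg (by simpa using hp)]

-- ===== VERDICT (by name: the statement is the Claim_ definition above) =====
theorem combine_fields_spec : Claim_equal_combine_fields := by
  intro parts _
  show combine_fields parts = combine_fields_alt parts
  unfold combine_fields combine_fields_alt
  rw [fold_eq]
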